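-- pv_equiv track=rewrite | github.com/mayanknichlani/Rubik-s-Cube-Solver | rubiks-cube-solver-main/app.py | color_array_to_bitboard
-- ===== SOURCE A (Python) =====
-- COLOR_TO_BIT = {
--     'W': 0,  # white
--     'G': 1,  # green
--     'R': 2,  # red
--     'B': 3,  # blue
--     'O': 4,  # orange
--     'Y': 5   # yellow
-- }
--
-- def color_array_to_bitboard(face_colors):
--     # face_colors: list of 8 color codes (no center)
--     bits = 0
--     for i in range(8):
--         color = face_colors[i]
--         bit = COLOR_TO_BIT.get(color, 0)
--         sticker_val = 1 << bit
--         bits |= (sticker_val << (i * 8))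
--     return bits
-- ===== SOURCE B (Python) =====
-- COLOR_TO_BIT = {
--     'W': 0,  # white
--     'G': 1,  # green
--     'R': 2,  # red
--     'B': 3,  # blue
--     'O': 4,  # orange
--     'Y': 5   # yellow
-- }
--
-- def color_array_to_bitboard(face_colors):
--     # Inverted, per-color-plane construction: for each of the 6 bit values,
--     # build the positional mask (sum of 256**i over the positions holding that
--     # color, unknown colors counting as bit 0) and add the weighted plane.
--     window = [face_colors[i] for i in range(8)]
--     total = 0
--     for bit in range(6):
--         mask = sum(256 ** i for i, c in enumerate(window) if COLOR_TO_BIT.get(c, 0) == bit)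
--         total += (1 << bit) * mask
--     return total
-- ===== Notes on version B (the rewrite author's own statement) =====
-- stated objective: alternative
-- what changed: Inverts the traversal: instead of A's single per-position shift-and-OR accumulator, B iterates over the 6 color bit values, builds each color's positional mask as a sum of 256**i over the matching positions (unknown colors count as bit 0), and sums the weighted planes.
import Mathlib
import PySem

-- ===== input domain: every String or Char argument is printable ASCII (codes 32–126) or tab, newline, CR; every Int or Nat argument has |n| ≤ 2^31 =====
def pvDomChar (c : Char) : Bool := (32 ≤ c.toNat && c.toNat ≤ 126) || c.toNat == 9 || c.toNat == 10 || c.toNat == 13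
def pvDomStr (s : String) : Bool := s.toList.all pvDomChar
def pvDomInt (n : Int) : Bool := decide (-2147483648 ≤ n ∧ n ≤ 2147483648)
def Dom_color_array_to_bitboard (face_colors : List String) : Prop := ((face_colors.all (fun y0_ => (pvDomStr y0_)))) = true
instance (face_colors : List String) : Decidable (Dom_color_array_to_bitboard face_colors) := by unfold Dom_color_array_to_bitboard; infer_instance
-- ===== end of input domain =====

-- B inverts the loop: instead of A's per-position shift-and-OR accumulator it builds, for
-- each of the 6 color bit values, that color's positional mask (a sum of 256^i over the
-- positions holding it) and sums the weighted planes (objective: alternative, same cost).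

-- ===== PORT A =====
-- COLOR_TO_BIT; values kept as Nat since they are only used as shift amounts (all in 0..5).
def COLOR_TO_BIT : PySem.Dict String Nat :=
  PySem.Dict.ofList [("W", 0), ("G", 1), ("R", 2), ("B", 3), ("O", 4), ("Y", 5)]

-- All intermediate ints (bits, sticker_val, shifts) are nonnegative, so Nat's |||/<<< are
-- exact for Python's |/<< here; the final result is cast to Int.
def color_array_to_bitboard (face_colors : List String) : Int :=
  Int.ofNat <| (List.range 8).foldl (fun (bits : Nat) (i : Nat) =>
    let color := (PySem.List.pyGet? face_colors (i : Int)).getD ""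
    let bit := PySem.Dict.getD COLOR_TO_BIT color 0
    let sticker_val := 1 <<< bit
    bits ||| (sticker_val <<< (i * 8))) 0

-- ===== PORT B =====
-- window = [face_colors[i] for i in range(8)]; then for bit in range(6):
--   mask = sum(256 ** i for i, c in enumerate(window) if COLOR_TO_BIT.get(c, 0) == bit)
--   total += (1 << bit) * mask
-- enumerate indices are Int and nonnegative here, so p.1.toNat is exact for 256 ** i.
def color_array_to_bitboard_alt (face_colors : List String) : Int :=
  let window := (List.range 8).map (fun (i : Nat) => (PySem.List.pyGet? face_colors (i : Int)).getD "")
  Int.ofNat <| (List.range 6).foldl (fun (total : Nat) (bit : Nat) =>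
    let mask := ((((PySem.List.enumerate window).filter
        (fun p => PySem.Dict.getD COLOR_TO_BIT p.2 0 == bit)).map
        (fun p => 256 ^ p.1.toNat)).sum)
    total + (1 <<< bit) * mask) 0

-- ===== PRECONDITION & SPEC =====
-- Pre_: face_colors[i] for i in range(8) raises IndexError in A when the list is shorter than 8.
def Pre_color_array_to_bitboard (face_colors : List String) : Prop := 8 ≤ face_colors.length
instance (face_colors : List String) : Decidable (Pre_color_array_to_bitboard face_colors) := by unfold Pre_color_array_to_bitboard; infer_instance
def pvWitness_color_array_to_bitboard : List String := ["W", "G", "R", "B", "O", "Y", "W", "G"]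

def Spec_color_array_to_bitboard (face_colors : List String) (out : Int) : Prop := out = color_array_to_bitboard_alt face_colors
instance (face_colors : List String) (out : Int) : Decidable (Spec_color_array_to_bitboard face_colors out) := by unfold Spec_color_array_to_bitboard; infer_instance

-- ===== CLAIM (what is proved, stated in full; the proofs are below) =====
def Claim_equal_color_array_to_bitboard : Prop := ∀ (face_colors : List String), Dom_color_array_to_bitboard face_colors → Pre_color_array_to_bitboard face_colors → Spec_color_array_to_bitboard face_colors (color_array_to_bitboard face_colors)

-- ===== LEMMAS AND PROOFS =====

-- every sticker's bit value is below 6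
theorem pv_bit_lt (s : String) : PySem.Dict.getD COLOR_TO_BIT s 0 < 6 := by
  have hmk : COLOR_TO_BIT = PySem.Dict.mk [("W", 0), ("G", 1), ("R", 2), ("B", 3), ("O", 4), ("Y", 5)] := by decide
  rw [PySem.Dict.getD, hmk]
  simp only [PySem.Dict.get?_mk_cons]
  repeat' split
  all_goals simp_all [PySem.Dict.get?]

-- disjoint OR is addition: a low part below 2^k ORed with anything shifted up by k
theorem pv_lor_shift (k : Nat) : ∀ a b : Nat, a < 2^k → a ||| (b <<< k) = a + b <<< k := by
  induction k with
  | zero => intro a b h; interval_cases a; simp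
  | succ k ih =>
    intro a b h
    have h2 : a / 2 < 2^k := by
      have : 2^(k+1) = 2*2^k := by ring
      omega
    have ihh := ih (a/2) b h2
    have hb : b <<< (k+1) = 2 * (b <<< k) := by
      simp [Nat.shiftLeft_succ, Nat.shiftLeft_eq]
    have hbit : Nat.bit (Nat.bodd a) (Nat.div2 a) ||| Nat.bit false (b <<< k)
        = Nat.bit (Nat.bodd a || false) (Nat.div2 a ||| (b <<< k)) := Nat.lor_bit _ _ _ _
    rw [Nat.bit_bodd_div2] at hbit
    have hd2 : Nat.div2 a = a / 2 := Nat.div2_val a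
    have hmb := Nat.mod_two_of_bodd a
    rw [hd2, ihh] at hbit
    simp only [Nat.bit, Bool.or_false] at hbit
    rw [hb]
    cases hB : Nat.bodd a <;> simp [hB] at hbit hmb <;> omega

-- the 8 one-byte values combine the same way under shift/OR and under base-256 positional sum
theorem pv_combine (v0 v1 v2 v3 v4 v5 v6 v7 : Nat)
    (h0 : v0 < 256) (h1 : v1 < 256) (h2 : v2 < 256) (h3 : v3 < 256)
    (h4 : v4 < 256) (h5 : v5 < 256) (h6 : v6 < 256) (_h7 : v7 < 256) :
    (((((((v0 ||| v1 <<< 8) ||| v2 <<< 16) ||| v3 <<< 24) ||| v4 <<< 32) ||| v5 <<< 40) ||| v6 <<< 48) ||| v7 <<< 56)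
    = v0 + 256 * (v1 + 256 * (v2 + 256 * (v3 + 256 * (v4 + 256 * (v5 + 256 * (v6 + 256 * v7)))))) := by
  have e1 := Nat.shiftLeft_eq v1 8
  have e2 := Nat.shiftLeft_eq v2 16
  have e3 := Nat.shiftLeft_eq v3 24
  have e4 := Nat.shiftLeft_eq v4 32
  have e5 := Nat.shiftLeft_eq v5 40
  have e6 := Nat.shiftLeft_eq v6 48
  have e7 := Nat.shiftLeft_eq v7 56
  rw [pv_lor_shift 8 _ _ (by omega)]
  rw [pv_lor_shift 16 _ _ (by omega)]
  rw [pv_lor_shift 24 _ _ (by omega)]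
  rw [pv_lor_shift 32 _ _ (by omega)]
  rw [pv_lor_shift 40 _ _ (by omega)]
  rw [pv_lor_shift 48 _ _ (by omega)]
  rw [pv_lor_shift 56 _ _ (by omega)]
  omega

-- A on an 8-long (or longer) list is the base-256 positional value of the 2^bit bytes
set_option maxRecDepth 8192 in
set_option maxHeartbeats 2000000 in
theorem pv_A (s0 s1 s2 s3 s4 s5 s6 s7 : String) (rest : List String) :
    color_array_to_bitboard (s0::s1::s2::s3::s4::s5::s6::s7::rest)
    = Int.ofNat (2 ^ (PySem.Dict.getD COLOR_TO_BIT s0 0) + 256 * (2 ^ (PySem.Dict.getD COLOR_TO_BIT s1 0)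
      + 256 * (2 ^ (PySem.Dict.getD COLOR_TO_BIT s2 0) + 256 * (2 ^ (PySem.Dict.getD COLOR_TO_BIT s3 0)
      + 256 * (2 ^ (PySem.Dict.getD COLOR_TO_BIT s4 0) + 256 * (2 ^ (PySem.Dict.getD COLOR_TO_BIT s5 0)
      + 256 * (2 ^ (PySem.Dict.getD COLOR_TO_BIT s6 0) + 256 * (2 ^ (PySem.Dict.getD COLOR_TO_BIT s7 0))))))))) := by
  have hv : ∀ s : String, (1 <<< PySem.Dict.getD COLOR_TO_BIT s 0) = 2 ^ PySem.Dict.getD COLOR_TO_BIT s 0 := by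
    intro s; rw [Nat.shiftLeft_eq, one_mul]
  have hlt : ∀ s : String, 2 ^ PySem.Dict.getD COLOR_TO_BIT s 0 < 256 := by
    intro s
    calc 2 ^ PySem.Dict.getD COLOR_TO_BIT s 0 ≤ 2 ^ 5 := Nat.pow_le_pow_right (by omega) (by have := pv_bit_lt s; omega)
      _ < 256 := by norm_num
  unfold color_array_to_bitboard
  simp only [show List.range 8 = [0,1,2,3,4,5,6,7] by decide, List.foldl_cons, List.foldl_nil,
    PySem.List.pyGet?_natCast]
  norm_num [hv]
  exact_mod_cast pv_combine _ _ _ _ _ _ _ _ (hlt s0) (hlt s1) (hlt s2) (hlt s3) (hlt s4) (hlt s5) (hlt s6) (hlt s7)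

-- a filtered-mapped sum peels one element as a weighted indicator
theorem sum_map_filter_cons {α : Type} (q : α → Bool) (f : α → Nat) (x : α) (l : List α) :
    (((x :: l).filter q).map f).sum = (if q x then f x else 0) + ((l.filter q).map f).sum := by
  by_cases h : q x = true <;> simp [h]

-- per-position plane decomposition: the six weighted indicator terms sum to 2^g * x
theorem pv_pos (g x : Nat) (h : g < 6) :
    1 * (if g = 0 then x else 0) + 2 * (if g = 1 then x else 0) + 4 * (if g = 2 then x else 0)
      + 8 * (if g = 3 then x else 0) + 16 * (if g = 4 then x else 0) + 32 * (if g = 5 then x else 0)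
    = 2 ^ g * x := by
  interval_cases g <;> simp

-- B on an 8-long (or longer) list is the same base-256 positional value
set_option maxRecDepth 8192 in
set_option maxHeartbeats 2000000 in
theorem pv_B (s0 s1 s2 s3 s4 s5 s6 s7 : String) (rest : List String) :
    color_array_to_bitboard_alt (s0::s1::s2::s3::s4::s5::s6::s7::rest)
    = Int.ofNat (2 ^ (PySem.Dict.getD COLOR_TO_BIT s0 0) + 256 * (2 ^ (PySem.Dict.getD COLOR_TO_BIT s1 0)
      + 256 * (2 ^ (PySem.Dict.getD COLOR_TO_BIT s2 0) + 256 * (2 ^ (PySem.Dict.getD COLOR_TO_BIT s3 0)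
      + 256 * (2 ^ (PySem.Dict.getD COLOR_TO_BIT s4 0) + 256 * (2 ^ (PySem.Dict.getD COLOR_TO_BIT s5 0)
      + 256 * (2 ^ (PySem.Dict.getD COLOR_TO_BIT s6 0) + 256 * (2 ^ (PySem.Dict.getD COLOR_TO_BIT s7 0))))))))) := by
  unfold color_array_to_bitboard_alt
  simp only [show List.range 8 = [0,1,2,3,4,5,6,7] by decide, List.map_cons, List.map_nil,
    PySem.List.pyGet?_natCast]
  norm_num
  congr 1
  simp only [show List.range 6 = [0,1,2,3,4,5] by decide, List.foldl_cons, List.foldl_nil,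
    PySem.List.enumerate_cons, PySem.List.enumerate_nil, sum_map_filter_cons,
    List.filter_nil, List.map_nil, List.sum_nil, beq_iff_eq]
  norm_num [show Int.toNat 2 = 2 from rfl, show Int.toNat 3 = 3 from rfl,
    show Int.toNat 4 = 4 from rfl, show Int.toNat 5 = 5 from rfl,
    show Int.toNat 6 = 6 from rfl, show Int.toNat 7 = 7 from rfl, Nat.shiftLeft_eq]
  have h0 := pv_pos (PySem.Dict.getD COLOR_TO_BIT s0 0) 1 (pv_bit_lt s0)
  have h1 := pv_pos (PySem.Dict.getD COLOR_TO_BIT s1 0) 256 (pv_bit_lt s1)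
  have h2 := pv_pos (PySem.Dict.getD COLOR_TO_BIT s2 0) 65536 (pv_bit_lt s2)
  have h3 := pv_pos (PySem.Dict.getD COLOR_TO_BIT s3 0) 16777216 (pv_bit_lt s3)
  have h4 := pv_pos (PySem.Dict.getD COLOR_TO_BIT s4 0) 4294967296 (pv_bit_lt s4)
  have h5 := pv_pos (PySem.Dict.getD COLOR_TO_BIT s5 0) 1099511627776 (pv_bit_lt s5)
  have h6 := pv_pos (PySem.Dict.getD COLOR_TO_BIT s6 0) 281474976710656 (pv_bit_lt s6)
  have h7 := pv_pos (PySem.Dict.getD COLOR_TO_BIT s7 0) 72057594037927936 (pv_bit_lt s7)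
  zify at h0 h1 h2 h3 h4 h5 h6 h7 ⊢
  linear_combination h0 + h1 + h2 + h3 + h4 + h5 + h6 + h7

-- ===== VERDICT (by name: the statement is the Claim_ definition above) =====
set_option maxRecDepth 8192 in
theorem color_array_to_bitboard_spec : Claim_equal_color_array_to_bitboard := by
  intro fc _ hpre
  unfold Pre_color_array_to_bitboard at hpre
  unfold Spec_color_array_to_bitboard
  match fc, hpre with
  | s0::s1::s2::s3::s4::s5::s6::s7::rest, _ => rw [pv_A, pv_B]
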